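-- pv_equiv track=rewrite | github.com/CodeBlack03/TapeAgents | tapeagents/autonomous_learning/trajectory_optimizer.py | _prioritize_insights
-- ===== SOURCE A (Python) =====
-- from typing import List, Dict, Any, Optional, Tuple
--
-- def _prioritize_insights(insights: List[str]) -> List[str]:
--     """Prioritize insights by importance."""
--     # Simple prioritization - in practice, this could be more sophisticated
--     priority_keywords = ["error", "success", "failure", "length", "pattern"]
--
--     prioritized = []
--     for keyword in priority_keywords:
--         for insight in insights:
--             if keyword in insight.lower() and insight not in prioritized:
--                 prioritized.append(insight)
--
--     # Add remaining insights
--     for insight in insights: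
--         if insight not in prioritized:
--             prioritized.append(insight)
--
--     return prioritized
-- ===== SOURCE B (Python) =====
-- def _prioritize_insights(insights):
--     """Prioritize insights by importance."""
--     priority_keywords = ["error", "success", "failure", "length", "pattern"]
--     n = len(priority_keywords)
--     # one pass: dedup with a seen-set, drop each insight into the bucket of its
--     # first matching keyword (bucket n = no match), then concatenate the buckets
--     buckets = [[] for _ in range(n + 1)]
--     seen = set()
--     for insight in insights:
--         if insight not in seen:
--             seen.add(insight)
--             lowered = insight.lower()
--             rank = next((i for i, kw in enumerate(priority_keywords) if kw in lowered), n)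
--             buckets[rank].append(insight)
--     return [insight for bucket in buckets for insight in bucket]
-- ===== Notes on version B (the rewrite author's own statement) =====
-- stated objective: faster
-- what changed: Replaced the keyword-major nested scans with repeated 'in prioritized' list lookups by a single pass over the insights that dedups with a seen-set and drops each insight into the bucket of its first matching keyword, then concatenates the buckets.
import Mathlib
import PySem

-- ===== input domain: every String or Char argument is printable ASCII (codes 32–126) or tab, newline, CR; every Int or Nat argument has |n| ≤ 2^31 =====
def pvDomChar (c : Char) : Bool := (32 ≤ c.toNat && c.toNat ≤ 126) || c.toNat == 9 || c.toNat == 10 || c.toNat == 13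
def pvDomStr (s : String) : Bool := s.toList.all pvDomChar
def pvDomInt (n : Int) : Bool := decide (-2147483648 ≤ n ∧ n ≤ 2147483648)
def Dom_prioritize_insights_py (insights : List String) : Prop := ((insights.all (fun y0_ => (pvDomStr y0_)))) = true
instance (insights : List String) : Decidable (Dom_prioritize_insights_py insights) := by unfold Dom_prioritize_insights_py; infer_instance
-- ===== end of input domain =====

-- B replaces A's keyword-major nested scans (with list-membership tests) by one pass over the
-- insights that dedups with a seen-set and buckets each insight by its first matching keyword.

-- ===== PORT A =====
-- literal transliteration of A: for each keyword, scan all insights, appending unseen matches;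
-- then a final scan appending the remaining insights.
def prioritize_insights_py (insights : List String) : List String :=
  let priority_keywords : List String := ["error", "success", "failure", "length", "pattern"]
  let prioritized :=
    priority_keywords.foldl (fun prioritized keyword =>
      insights.foldl (fun prioritized insight =>
        if PySem.Str.isIn keyword (PySem.Str.lower insight) && !(prioritized.contains insight)
        then prioritized ++ [insight] else prioritized) prioritized) []
  insights.foldl (fun prioritized insight =>
    if !(prioritized.contains insight) then prioritized ++ [insight] else prioritized) prioritized

-- ===== PORT B =====
-- transliteration of Source B: buckets[rank-of-first-matching-keyword].append, dedup via a seen set,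
-- then flatten the buckets ('next(... enumerate ...)' is List.findIdx: first index, default = length).
def prioritize_insights_py_alt (insights : List String) : List String :=
  let priority_keywords : List String := ["error", "success", "failure", "length", "pattern"]
  let res :=
    insights.foldl (fun (st : List (List String) × PySem.Set String) insight =>
      if !(PySem.Set.contains st.2 insight) then
        let lowered := PySem.Str.lower insight
        let rank := priority_keywords.findIdx (fun kw => PySem.Str.isIn kw lowered)
        (st.1.set rank (st.1.getD rank [] ++ [insight]), PySem.Set.add st.2 insight)
      else st)
      (List.replicate (priority_keywords.length + 1) [], PySem.Set.empty)
  res.1.flatMap id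

-- ===== PRECONDITION & SPEC =====
def Spec_prioritize_insights_py (insights : List String) (out : List String) : Prop := out = prioritize_insights_py_alt insights
instance (insights : List String) (out : List String) : Decidable (Spec_prioritize_insights_py insights out) := by unfold Spec_prioritize_insights_py; infer_instance

-- ===== CLAIM (what is proved, stated in full; the proofs are below) =====
def Claim_equal_prioritize_insights_py : Prop := ∀ (insights : List String), Dom_prioritize_insights_py insights → Spec_prioritize_insights_py insights (prioritize_insights_py insights)

-- ===== LEMMAS AND PROOFS =====

-- the keyword list and the two predicates both programs share
def pvKws : List String := ["error", "success", "failure", "length", "pattern"]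
def pvP (kw y : String) : Bool := PySem.Str.isIn kw (PySem.Str.lower y)
def pvRankIn (kws : List String) (y : String) : Nat := kws.findIdx (fun kw => pvP kw y)

-- first-occurrence dedup of a list, skipping values already "seen" (seen is a membership predicate)
def pvSeenAdd (seen : String → Bool) (x : String) : String → Bool := fun y => seen y || y == x
def pvDded (seen : String → Bool) : List String → List String
  | [] => []
  | x :: l => if seen x then pvDded seen l else x :: pvDded (pvSeenAdd seen x) l

lemma pvDded_congr (l : List String) : ∀ (s t : String → Bool), (∀ y, s y = t y) →
    pvDded s l = pvDded t l := by
  induction l with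
  | nil => intro s t h; rfl
  | cons x l ih =>
    intro s t h
    simp only [pvDded, h x]
    split
    · exact ih s t h
    · exact congrArg _ (ih _ _ (fun y => by simp [pvSeenAdd, h y]))

lemma pvDded_split (l : List String) : ∀ (s e : String → Bool),
    pvDded (fun y => s y || e y) l = (pvDded s l).filter (fun y => !(e y)) := by
  induction l with
  | nil => intro s e; rfl
  | cons x l ih =>
    intro s e
    cases hs : s x with
    | true => simp [pvDded, hs, ih]
    | false =>
      cases he : e x with
      | true =>
        have hcg : pvDded (fun y => s y || e y) l
            = pvDded (fun y => (pvSeenAdd s x) y || e y) l := by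
          apply pvDded_congr
          intro y
          cases hyx : (y == x) with
          | true => have := eq_of_beq hyx; subst this; simp [pvSeenAdd, he]
          | false => simp [pvSeenAdd, hyx]
        simp [pvDded, hs, he, hcg, ih]
      | false =>
        have hcg : pvDded (pvSeenAdd (fun y => s y || e y) x) l
            = pvDded (fun y => (pvSeenAdd s x) y || e y) l := by
          apply pvDded_congr
          intro y
          cases hyx : (y == x) <;> cases hsy : s y <;> cases hey : e y <;>
            simp [pvSeenAdd, hyx, hsy, hey]
        simp [pvDded, hs, he, hcg, ih]

-- combine two filters into one (fixing the argument order of List.filter_filter)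
lemma pvFilter2 (l : List String) (p q : String → Bool) :
    (l.filter p).filter q = l.filter (fun y => p y && q y) := by
  rw [List.filter_filter]
  apply List.filter_congr
  intro y _
  cases p y <;> cases q y <;> simp

-- one pass of A's keyword loop, for an arbitrary predicate p
lemma pvPassA (p : String → Bool) (l : List String) : ∀ (pr : List String) (seen : String → Bool),
    (∀ y, p y = true → (decide (y ∈ pr) : Bool) = seen y) →
    l.foldl (fun pr x => if p x && !(pr.contains x) then pr ++ [x] else pr) pr
      = pr ++ (pvDded seen l).filter p := by
  induction l with
  | nil => intro pr seen _; simp [pvDded]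
  | cons x l ih =>
    intro pr seen hc
    by_cases hseen : seen x = true
    · have hcond : (p x && !(pr.contains x)) = false := by
        cases hp : p x
        · simp
        · have h : (decide (x ∈ pr) : Bool) = true := (hc x hp).trans hseen
          simp [List.contains_eq_mem, h]
      simp only [pvDded, hseen, if_true, List.foldl_cons, hcond, Bool.false_eq_true, if_false]
      exact ih pr seen hc
    · simp only [Bool.not_eq_true] at hseen
      simp only [pvDded, hseen, Bool.false_eq_true, if_false, List.foldl_cons]
      cases hp : p x with
      | false =>
        simp only [Bool.false_and, Bool.false_eq_true, if_false, List.filter_cons, hp]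
        refine ih pr (pvSeenAdd seen x) (fun y hy => ?_)
        have hyx : (y == x) = false := by
          cases hyx : (y == x)
          · rfl
          · exact absurd (eq_of_beq hyx ▸ hy) (by simp [hp])
        simp [pvSeenAdd, hyx, hc y hy]
      | true =>
        have hprx : pr.contains x = false := by
          simp [List.contains_eq_mem, hc x hp, hseen]
        simp only [hp, hprx, Bool.true_and, Bool.not_false, if_true, List.filter_cons]
        rw [ih (pr ++ [x]) (pvSeenAdd seen x) (fun y hy => ?_)]
        · simp [hp]
        · cases hyx : (y == x) with
          | false =>
            have hne : y ≠ x := ne_of_beq_false hyx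
            simp [pvSeenAdd, hyx, hne, hc y hy]
          | true =>
            have heq := eq_of_beq hyx
            subst heq
            simp [pvSeenAdd, hyx]

-- A's trailing loop is the p = ⊤ pass
lemma pvPassFinal (l : List String) : ∀ (pr : List String) (seen : String → Bool),
    (∀ y, (decide (y ∈ pr) : Bool) = seen y) →
    l.foldl (fun pr x => if !(pr.contains x) then pr ++ [x] else pr) pr
      = pr ++ pvDded seen l := by
  induction l with
  | nil => intro pr seen _; simp [pvDded]
  | cons x l ih =>
    intro pr seen hc
    by_cases hseen : seen x = true
    · have hcx : pr.contains x = true := by simp [List.contains_eq_mem, hc x, hseen]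
      simp only [pvDded, hseen, if_true, List.foldl_cons, hcx, Bool.not_true, Bool.false_eq_true,
        if_false]
      exact ih pr seen hc
    · simp only [Bool.not_eq_true] at hseen
      have hcx : pr.contains x = false := by simp [List.contains_eq_mem, hc x, hseen]
      simp only [pvDded, hseen, Bool.false_eq_true, if_false, List.foldl_cons, hcx,
        Bool.not_false, if_true]
      rw [ih (pr ++ [x]) (pvSeenAdd seen x) (fun y => ?_)]
      · simp
      · cases hyx : (y == x) with
        | false =>
          have hne : y ≠ x := ne_of_beq_false hyx
          simp [pvSeenAdd, hyx, hne, hc y]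
        | true =>
          have heq := eq_of_beq hyx
          subst heq
          simp [pvSeenAdd, hyx]

-- A's whole keyword phase, by induction over the keyword list
lemma pvPhase (insights : List String) (kws : List String) : ∀ (P : List String),
    kws.foldl (fun prioritized keyword =>
      insights.foldl (fun prioritized insight =>
        if pvP keyword insight && !(prioritized.contains insight)
        then prioritized ++ [insight] else prioritized) prioritized) P
    = P ++ (List.range kws.length).flatMap (fun r =>
        (pvDded (fun _ => false) insights).filter
          (fun y => !(P.contains y) && (pvRankIn kws y == r))) := by
  induction kws with
  | nil => intro P; simp
  | cons k rest ih =>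
    intro P
    simp only [List.foldl_cons]
    rw [pvPassA (pvP k) insights P (fun y => P.contains y)
        (fun y _ => by simp [List.contains_eq_mem]),
      pvDded_congr insights _ (fun y => false || P.contains y) (fun y => by simp),
      pvDded_split insights (fun _ => false) (fun y => P.contains y), pvFilter2]
    set dd := pvDded (fun _ => false) insights with hdd
    rw [ih (P ++ dd.filter (fun y => !(P.contains y) && pvP k y))]
    have hA : ∀ r : Nat,
        dd.filter (fun y =>
            !((P ++ dd.filter (fun y => !(P.contains y) && pvP k y)).contains y)
            && (pvRankIn rest y == r))
          = dd.filter (fun y => !(P.contains y) && (pvRankIn (k :: rest) y == r + 1)) := by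
      intro r
      apply List.filter_congr
      intro y hy
      by_cases hP : y ∈ P <;> cases hk : pvP k y <;>
        simp [List.contains_append, List.contains_eq_mem, List.mem_filter, hy, hP, hk,
          pvRankIn, List.findIdx_cons]
    have hB : dd.filter (fun y => !(P.contains y) && pvP k y)
        = dd.filter (fun y => !(P.contains y) && (pvRankIn (k :: rest) y == 0)) := by
      apply List.filter_congr
      intro y _
      cases hk : pvP k y <;> cases hP : P.contains y <;>
        simp [hk, hP, pvRankIn, List.findIdx_cons]
    simp only [List.length_cons, List.range_succ_eq_map, List.flatMap_cons, List.flatMap_map,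
      Nat.succ_eq_add_one, hA, List.append_assoc]
    conv_lhs => rw [hB]

-- a length-6 table rebuilt from its entries
lemma pvTable (bks : List (List String)) (h : bks.length = 6) :
    (List.range 6).map (fun r => bks.getD r []) = bks := by
  apply List.ext_getElem
  · simp [h]
  · intro i h1 h2
    simp only [List.getElem_map, List.getElem_range]
    exact List.getD_eq_getElem bks [] (by omega)

-- the seen-set of B, as a membership predicate, after adding one element
lemma pvSetAdd (s : PySem.Set String) (x y : String) :
    PySem.Set.contains (PySem.Set.add s x) y
      = pvSeenAdd (fun z => PySem.Set.contains s z) x y := by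
  unfold PySem.Set.add pvSeenAdd
  split
  · rename_i hcs
    cases hyx : (y == x)
    · simp
    · have := eq_of_beq hyx; subst this
      simp only [Bool.or_true]
      simpa using hcs
  · cases hyx : (y == x) with
    | false =>
      have hne : y ≠ x := ne_of_beq_false hyx
      simp [PySem.Set.contains_eq_listContains, List.contains_eq_mem, hyx, hne]
    | true =>
      have heq := eq_of_beq hyx
      subst heq
      simp [PySem.Set.contains_eq_listContains, List.contains_eq_mem, hyx]

-- B's single pass, by induction over the insights
lemma pvBside (l : List String) : ∀ (bks : List (List String)) (seen : PySem.Set String),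
    bks.length = 6 →
    (l.foldl (fun (st : List (List String) × PySem.Set String) insight =>
      if !(PySem.Set.contains st.2 insight) then
        (st.1.set (pvKws.findIdx (fun kw => pvP kw insight))
          (st.1.getD (pvKws.findIdx (fun kw => pvP kw insight)) [] ++ [insight]),
         PySem.Set.add st.2 insight)
      else st) (bks, seen)).1
    = (List.range 6).map (fun r =>
        bks.getD r [] ++ (pvDded (fun y => PySem.Set.contains seen y) l).filter
          (fun y => pvRankIn pvKws y == r)) := by
  induction l with
  | nil =>
    intro bks seen h
    simp only [List.foldl_nil, pvDded, List.filter_nil, List.append_nil]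
    exact (pvTable bks h).symm
  | cons x l ih =>
    intro bks seen h
    by_cases hs : PySem.Set.contains seen x = true
    · simp only [List.foldl_cons, hs, Bool.not_true, Bool.false_eq_true, if_false, pvDded]
      exact ih bks seen h
    · simp only [Bool.not_eq_true] at hs
      simp only [List.foldl_cons, hs, Bool.not_false, if_true, pvDded, Bool.false_eq_true,
        if_false]
      have hrank : pvKws.findIdx (fun kw => pvP kw x) = pvRankIn pvKws x := rfl
      have hlt : pvRankIn pvKws x < 6 := by
        have hle : List.findIdx (fun kw => pvP kw x) pvKws ≤ pvKws.length :=
          List.findIdx_le_length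
        have h5 : pvKws.length = 5 := rfl
        have hr : pvRankIn pvKws x = List.findIdx (fun kw => pvP kw x) pvKws := rfl
        omega
      rw [hrank, ih _ _ (by simp [h])]
      apply List.map_congr_left
      intro r hr
      have hdd : pvDded (fun y => PySem.Set.contains (PySem.Set.add seen x) y) l
          = pvDded (pvSeenAdd (fun y => PySem.Set.contains seen y) x) l :=
        pvDded_congr l _ _ (fun y => pvSetAdd seen x y)
      rw [hdd]
      by_cases hxr : pvRankIn pvKws x = r
      · subst hxr
        rw [List.getD_eq_getElem _ [] (by simpa [h] using hlt),
          List.getElem_set_self (by simpa [h] using hlt), List.getD_eq_getElem bks [] (by omega)]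
        simp [List.append_assoc]
      · have hgd : (bks.set (pvRankIn pvKws x)
            (bks.getD (pvRankIn pvKws x) [] ++ [x])).getD r []
            = bks.getD r [] := by
          simp [List.getD, List.getElem?_set_ne hxr]
        rw [hgd]
        simp [hxr]

theorem pv_main (insights : List String) :
    prioritize_insights_py insights = prioritize_insights_py_alt insights := by
  unfold prioritize_insights_py prioritize_insights_py_alt
  dsimp only
  simp only [show ∀ (kw y : String), PySem.Str.isIn kw (PySem.Str.lower y) = pvP kw y
    from fun _ _ => rfl]
  rw [show (["error", "success", "failure", "length", "pattern"] : List String) = pvKws from rfl]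
  rw [pvBside insights (List.replicate (pvKws.length + 1) []) PySem.Set.empty (by simp [pvKws])]
  rw [pvPhase insights pvKws []]
  set dd := pvDded (fun _ => false) insights with hdd
  -- the keyword phase of A, with P = []
  have hP5 : ∀ r : Nat, dd.filter (fun y => !(List.contains [] y) && (pvRankIn pvKws y == r))
      = dd.filter (fun y => pvRankIn pvKws y == r) := by
    intro r
    apply List.filter_congr
    intro y _
    simp
  simp only [hP5, List.nil_append]
  set P5 := (List.range pvKws.length).flatMap
    (fun r => dd.filter (fun y => pvRankIn pvKws y == r)) with hP5def
  -- A's trailing loop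
  rw [pvPassFinal insights P5 (fun y => decide (y ∈ P5)) (fun y => rfl),
    pvDded_congr insights (fun y => decide (y ∈ P5))
      (fun y => false || decide (y ∈ P5)) (fun y => by simp),
    pvDded_split insights (fun _ => false) (fun y => decide (y ∈ P5)), ← hdd]
  have hrest : dd.filter (fun y => !(decide (y ∈ P5)))
      = dd.filter (fun y => pvRankIn pvKws y == 5) := by
    apply List.filter_congr
    intro y hy
    have hle : pvRankIn pvKws y ≤ 5 := by
      have h := (List.findIdx_le_length : List.findIdx (fun kw => pvP kw y) pvKws ≤ pvKws.length)
      simpa [pvRankIn, pvKws] using h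
    have hmem : y ∈ P5 ↔ pvRankIn pvKws y < 5 := by
      rw [hP5def]
      simp only [List.mem_flatMap, List.mem_range, List.mem_filter]
      constructor
      · rintro ⟨r, hr, _, hrk⟩
        have hr5 : pvRankIn pvKws y = r := by simpa using hrk
        subst hr5
        simpa [pvKws] using hr
      · intro h5
        exact ⟨pvRankIn pvKws y, by simpa [pvKws] using h5, hy, by simp⟩
    by_cases h5 : pvRankIn pvKws y = 5
    · simp [h5, hmem]
    · have hlt5 : pvRankIn pvKws y < 5 := by omega
      simp [hmem, hlt5, h5]
  rw [hrest]
  -- assemble: range 5 + the leftover bucket = range 6, and B's buckets flatten to the same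
  have hB : ((List.range 6).map (fun r =>
        (List.replicate (pvKws.length + 1) ([] : List String)).getD r []
          ++ (pvDded (fun y => PySem.Set.contains PySem.Set.empty y) insights).filter
            (fun y => pvRankIn pvKws y == r))).flatMap id
      = (List.range 6).flatMap (fun r => dd.filter (fun y => pvRankIn pvKws y == r)) := by
    rw [List.flatMap_map]
    apply List.flatMap_congr
    intro r hr
    rw [pvDded_congr insights (fun y => PySem.Set.contains PySem.Set.empty y)
      (fun _ => false) (fun y => rfl), ← hdd]
    simp
  rw [hB, show (6 : Nat) = 5 + 1 from rfl, List.range_succ, List.flatMap_append]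
  simp only [hP5def, show pvKws.length = 5 from rfl, List.flatMap_cons, List.flatMap_nil,
    List.append_nil]

-- ===== VERDICT (by name: the statement is the Claim_ definition above) =====
theorem prioritize_insights_py_spec : Claim_equal_prioritize_insights_py := by
  intro insights _
  exact pv_main insights
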